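-- pv_equiv track=rewrite | github.com/akshay-greenlang/Code-V1_GreenLang | packs/ghg-accounting/PACK-045-base-year/templates/audit_trail_report.py | _html_summary
-- ===== SOURCE A (Python) =====
-- from typing import Any, Dict, List, Optional
--
-- def _html_summary(data: Dict[str, Any]) -> str:
--     """Render HTML audit summary."""
--     entries = data.get("entries", [])
--     by_type: Dict[str, int] = {}
--     for e in entries:
--         etype = e.get("event_type", "other")
--         by_type[etype] = by_type.get(etype, 0) + 1
--     items = "".join(f"<li><strong>{k}:</strong> {v}</li>" for k, v in sorted(by_type.items()))
--     return f'<div class="section">\n<h2>1. Summary</h2>\n<ul>{items}</ul>\n</div>'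
-- ===== SOURCE B (Python) =====
-- def _html_summary(data):
--     """Render HTML audit summary (sort-then-group instead of dict counting)."""
--     entries = data.get("entries", [])
--     keys = sorted(e.get("event_type", "other") for e in entries)
--     parts = []
--     i = 0
--     n = len(keys)
--     while i < n:
--         j = i + 1
--         while j < n and keys[j] == keys[i]:
--             j += 1
--         parts.append(f"<li><strong>{keys[i]}:</strong> {j - i}</li>")
--         i = j
--     return f'<div class="section">\n<h2>1. Summary</h2>\n<ul>{"".join(parts)}</ul>\n</div>'
-- ===== Notes on version B (the rewrite author's own statement) =====
-- stated objective: alternative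
-- what changed: A counts event types into a dict and then sorts the distinct keys; B builds no dict at all: it sorts the full key list of all entries and emits one <li> per contiguous run with the run length as the count.
import Mathlib
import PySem

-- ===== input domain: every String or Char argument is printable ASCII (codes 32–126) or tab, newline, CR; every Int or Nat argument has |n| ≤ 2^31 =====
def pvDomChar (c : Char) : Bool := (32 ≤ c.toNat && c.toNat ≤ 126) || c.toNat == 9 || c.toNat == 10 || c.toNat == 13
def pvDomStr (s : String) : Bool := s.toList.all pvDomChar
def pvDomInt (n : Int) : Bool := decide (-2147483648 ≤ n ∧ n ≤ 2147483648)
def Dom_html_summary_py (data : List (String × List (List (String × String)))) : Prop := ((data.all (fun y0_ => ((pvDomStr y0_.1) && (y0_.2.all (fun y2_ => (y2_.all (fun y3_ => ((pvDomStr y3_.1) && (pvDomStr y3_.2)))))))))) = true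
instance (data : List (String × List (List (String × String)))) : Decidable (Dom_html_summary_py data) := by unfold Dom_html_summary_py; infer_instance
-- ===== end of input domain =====

-- B replaces A's count-into-a-dict-then-sort-keys strategy by sort-all-keys-then-group-runs
-- (no intermediate count dict); objective: alternative decomposition, same result.

-- e.get("event_type", "other") on the association-list dict (first match)
def eventType (e : List (String × String)) : String :=
  ((e.find? (fun p => p.1 == "event_type")).map Prod.snd).getD "other"

-- data.get("entries", []) (first match)
def getEntries (data : List (String × List (List (String × String)))) :
    List (List (String × String)) :=
  ((data.find? (fun p => p.1 == "entries")).map Prod.snd).getD []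

-- ===== PORT A =====
def html_summary_py (data : List (String × List (List (String × String)))) : String :=
  let entries := getEntries data
  let by_type : PySem.Dict String Int :=
    entries.foldl (fun d e => d.insert (eventType e) (d.getD (eventType e) 0 + 1))
      PySem.Dict.empty
  let items := PySem.Str.join ""
    ((PySem.List.sorted2 by_type.items Prod.fst Prod.snd).map
      (fun kv => "<li><strong>" ++ kv.1 ++ ":</strong> " ++ PySem.Int.toStr kv.2 ++ "</li>"))
  "<div class=\"section\">\n<h2>1. Summary</h2>\n<ul>" ++ items ++ "</ul>\n</div>"

-- ===== PORT B =====
-- the inner 'while keys[j] == keys[i]' scan of Source B: one run per distinct key, with its length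
def runs : List String → List (String × Int)
  | [] => []
  | k :: rest =>
    (k, 1 + ((rest.takeWhile (fun x => x == k)).length : Int)) ::
      runs (rest.dropWhile (fun x => x == k))
termination_by s => s.length
decreasing_by
  simp only [List.length_cons]
  exact Nat.lt_succ_of_le (List.length_dropWhile_le _ _)

def html_summary_py_alt (data : List (String × List (List (String × String)))) : String :=
  let entries := getEntries data
  let keys := PySem.List.sorted (entries.map (fun e => eventType e)) (fun k => k)
  let parts := (runs keys).map
    (fun kc => "<li><strong>" ++ kc.1 ++ ":</strong> " ++ PySem.Int.toStr kc.2 ++ "</li>")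
  "<div class=\"section\">\n<h2>1. Summary</h2>\n<ul>" ++ PySem.Str.join "" parts ++ "</ul>\n</div>"

-- ===== PRECONDITION & SPEC =====
def Spec_html_summary_py (data : List (String × List (List (String × String)))) (out : String) : Prop := out = html_summary_py_alt data
instance (data : List (String × List (List (String × String)))) (out : String) : Decidable (Spec_html_summary_py data out) := by unfold Spec_html_summary_py; infer_instance

-- ===== CLAIM (what is proved, stated in full; the proofs are below) =====
def Claim_equal_html_summary_py : Prop := ∀ (data : List (String × List (List (String × String)))), Dom_html_summary_py data → Spec_html_summary_py data (html_summary_py data)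

-- ===== LEMMAS AND PROOFS =====

lemma insertBy_congr {α : Type} (b1 b2 : α → α → Bool) (x : α) (acc : List α)
    (h : ∀ y ∈ acc, b1 x y = b2 x y) :
    PySem.List.insertBy b1 x acc = PySem.List.insertBy b2 x acc := by
  induction acc with
  | nil => rfl
  | cons y ys ih =>
    simp only [PySem.List.insertBy]
    rw [h y (by simp)]
    by_cases hb : b2 x y = true
    · simp [hb]
    · simp only [hb]
      have := ih (fun z hz => h z (by simp [hz]))
      rw [this]

lemma foldl_insertBy_congr {α : Type} (b1 b2 : α → α → Bool) (xs acc S : List α)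
    (hxs : ∀ x ∈ xs, x ∈ S) (hacc : ∀ y ∈ acc, y ∈ S)
    (h : ∀ a ∈ S, ∀ b ∈ S, b1 a b = b2 a b) :
    xs.foldl (fun acc x => PySem.List.insertBy b1 x acc) acc
      = xs.foldl (fun acc x => PySem.List.insertBy b2 x acc) acc := by
  induction xs generalizing acc with
  | nil => rfl
  | cons x xs' ih =>
    simp only [List.foldl_cons]
    rw [insertBy_congr b1 b2 x acc
      (fun y hy => h x (hxs x (by simp)) y (hacc y hy))]
    exact ih (PySem.List.insertBy b2 x acc)
      (fun z hz => hxs z (by simp [hz]))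
      (fun y hy => by
        rcases (PySem.List.mem_insertBy b2 x y acc).mp hy with rfl | hy'
        · exact hxs y (by simp)
        · exact hacc y hy')

lemma sorted2_eq_sorted_fst (xs : List (String × Int)) (h : (xs.map Prod.fst).Nodup) :
    PySem.List.sorted2 xs Prod.fst Prod.snd = PySem.List.sorted xs Prod.fst := by
  have hinj : ∀ a ∈ xs, ∀ b ∈ xs, a.1 = b.1 → a = b :=
    List.inj_on_of_nodup_map h
  show xs.foldl _ [] = xs.foldl _ []
  apply foldl_insertBy_congr _ _ xs [] xs (fun x hx => hx) (by simp)
  intro a ha b hb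
  by_cases h1 : a.1 < b.1
  · simp [h1]
  · by_cases h2 : b.1 < a.1
    · simp [h1, h2]
    · have : a.1 = b.1 := le_antisymm (not_lt.mp h2) (not_lt.mp h1)
      have hab : a = b := hinj a ha b hb this
      subst hab
      simp

lemma not_mem_dropWhile_beq (l : List String) (k : String)
    (hle : ∀ x ∈ l, k ≤ x) (hp : l.Pairwise (· ≤ ·)) :
    k ∉ l.dropWhile (fun x => x == k) := by
  induction l with
  | nil => simp
  | cons x l' ih =>
    rcases List.pairwise_cons.mp hp with ⟨hx, hp'⟩
    rw [List.dropWhile_cons]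
    by_cases hxk : (x == k) = true
    · rw [if_pos hxk]
      exact ih (fun z hz => hle z (by simp [hz])) hp'
    · rw [if_neg hxk]
      have hxk' : x ≠ k := by simpa using hxk
      have hkx : k < x := lt_of_le_of_ne (hle x (by simp)) (Ne.symm hxk')
      intro hmem
      rcases List.mem_cons.mp hmem with rfl | hmem'
      · exact absurd rfl hxk'.symm
      · exact absurd (lt_of_lt_of_le hkx (hx k hmem')) (lt_irrefl k)

lemma runs_key_mem (s : List String) (p : String × Int) (hp : p ∈ runs s) : p.1 ∈ s := by
  induction s using runs.induct with
  | case1 => simp [runs] at hp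
  | case2 k rest ih =>
    rw [runs] at hp
    rcases List.mem_cons.mp hp with rfl | hmem
    · simp
    · have := ih hmem
      exact List.mem_cons_of_mem _ ((List.dropWhile_sublist _).mem this)

lemma mem_runs (s : List String) (hs : s.Pairwise (· ≤ ·)) (p : String × Int) :
    p ∈ runs s ↔ (p.1 ∈ s ∧ p.2 = (s.count p.1 : Int)) := by
  induction s using runs.induct with
  | case1 => simp [runs]
  | case2 k rest ih =>
    rcases List.pairwise_cons.mp hs with ⟨hkle, hrest⟩
    rw [runs]
    set t := rest.takeWhile (fun x => x == k) with ht
    set d := rest.dropWhile (fun x => x == k) with hd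
    have htd : t ++ d = rest := List.takeWhile_append_dropWhile
    have htk : ∀ x ∈ t, x = k := fun x hx => by
      have := List.mem_takeWhile_imp hx
      simpa using this
    have hkd : k ∉ d := not_mem_dropWhile_beq rest k hkle hrest
    have hdsub : d.Sublist rest := List.dropWhile_sublist _
    have hdp : d.Pairwise (· ≤ ·) := hrest.sublist hdsub
    have hct : t.count k = t.length := List.count_eq_length.mpr (fun b hb => (htk b hb).symm)
    have hcd : d.count k = 0 := List.count_eq_zero.mpr hkd
    have hck : rest.count k = t.length := by
      rw [← htd, List.count_append, hct, hcd]
      omega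
    have hcne : ∀ x, x ≠ k → rest.count x = d.count x := by
      intro x hx
      have h0 : t.count x = 0 := List.count_eq_zero.mpr (fun hmem => hx (htk x hmem))
      rw [← htd, List.count_append, h0, Nat.zero_add]
    constructor
    · intro hp
      rcases List.mem_cons.mp hp with rfl | hmem
      · refine ⟨by simp, ?_⟩
        simp only [List.count_cons_self, hck]
        push_cast; ring
      · rcases (ih hdp).mp hmem with ⟨h1, h2⟩
        have hne : p.1 ≠ k := fun he => hkd (he ▸ h1)
        refine ⟨List.mem_cons_of_mem _ (hdsub.mem h1), ?_⟩
        rw [List.count_cons_of_ne (Ne.symm hne), hcne p.1 hne, ← h2]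
    · rintro ⟨h1, h2⟩
      by_cases hpk : p.1 = k
      · have hp2 : p = (k, 1 + (t.length : Int)) := by
          have hv : p.2 = (1 : Int) + (t.length : Int) := by
            rw [h2, hpk, List.count_cons_self, hck]; push_cast; ring
          calc p = (p.1, p.2) := rfl
            _ = (k, 1 + (t.length : Int)) := by rw [hpk, hv]
        rw [hp2]
        exact List.mem_cons_self
      · rcases List.mem_cons.mp h1 with he | hmem
        · exact absurd he hpk
        · have hmd : p.1 ∈ d := by
            rcases List.mem_append.mp (htd ▸ hmem) with hmt | hmd
            · exact absurd (htk _ hmt) hpk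
            · exact hmd
          refine List.mem_cons_of_mem _ ((ih hdp).mpr ⟨hmd, ?_⟩)
          rw [h2, List.count_cons_of_ne (Ne.symm hpk), hcne p.1 hpk]

lemma runs_pairwise (s : List String) (hs : s.Pairwise (· ≤ ·)) :
    (runs s).Pairwise (fun a b => a.1 < b.1) := by
  induction s using runs.induct with
  | case1 => simp [runs]
  | case2 k rest ih =>
    rcases List.pairwise_cons.mp hs with ⟨hkle, hrest⟩
    have hdsub : (rest.dropWhile (fun x => x == k)).Sublist rest := List.dropWhile_sublist _
    have hdp := hrest.sublist hdsub
    have hkd : k ∉ rest.dropWhile (fun x => x == k) :=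
      not_mem_dropWhile_beq rest k hkle hrest
    rw [runs]
    refine List.pairwise_cons.mpr ⟨?_, ih hdp⟩
    intro q hq
    have hqd := runs_key_mem _ q hq
    have hle := hkle q.1 (hdsub.mem hqd)
    exact lt_of_le_of_ne hle (fun he => hkd (by
      have h' : q.1 = k := (show k = q.1 from he).symm
      rw [h'] at hqd; exact hqd))

-- the heart: A's sorted dict items are exactly B's runs of the sorted key list
lemma counter_sorted_eq_runs (ks : List String) :
    PySem.List.sorted2 (PySem.Dict.counter ks).items Prod.fst Prod.snd
      = runs (PySem.List.sorted ks (fun k => k)) := by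
  have hkeys : ((PySem.Dict.counter ks).items.map Prod.fst).Nodup :=
    PySem.Dict.nodup_keys_counter ks
  rw [sorted2_eq_sorted_fst _ hkeys]
  have hsp : (PySem.List.sorted ks (fun k => k)).Pairwise (fun a b => a ≤ b) :=
    PySem.List.sorted_pairwise ks (fun k => k)
  have hcount : ∀ x, (PySem.List.sorted ks (fun k => k)).count x = ks.count x :=
    fun x => (PySem.List.sorted_perm ks (fun k => k) false).count_eq x
  have hmem_items : ∀ p : String × Int,
      p ∈ (PySem.Dict.counter ks).items ↔ (p.1 ∈ ks ∧ p.2 = (ks.count p.1 : Int)) := by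
    intro p
    rw [PySem.Dict.items_counter]
    constructor
    · intro hp
      rcases List.mem_map.mp hp with ⟨a, ha, hfa⟩
      subst hfa
      exact ⟨(PySem.Set.mem_ofList ks a).mp ha, rfl⟩
    · rintro ⟨h1, h2⟩
      refine List.mem_map.mpr ⟨p.1, (PySem.Set.mem_ofList ks p.1).mpr h1, ?_⟩
      rw [← h2]
  have hnodup_runs : (runs (PySem.List.sorted ks (fun k => k))).Nodup :=
    (runs_pairwise _ hsp).imp (fun h => fun he => absurd (he ▸ h) (lt_irrefl _))
  have hnodup_items : ((PySem.Dict.counter ks).items).Nodup :=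
    List.Nodup.of_map Prod.fst hkeys
  have hperm : (runs (PySem.List.sorted ks (fun k => k))).Perm (PySem.Dict.counter ks).items := by
    rw [List.perm_ext_iff_of_nodup hnodup_runs hnodup_items]
    intro p
    rw [mem_runs _ hsp p, hmem_items p, PySem.List.mem_sorted, hcount]
  exact PySem.List.sorted_eq_of_perm_of_pairwise_lt _ _ Prod.fst hperm (runs_pairwise _ hsp)

-- ===== VERDICT (by name: the statement is the Claim_ definition above) =====
theorem html_summary_py_spec : Claim_equal_html_summary_py := by
  intro data _
  unfold Spec_html_summary_py html_summary_py html_summary_py_alt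
  have hfold :
      (getEntries data).foldl
        (fun d e => d.insert (eventType e) (d.getD (eventType e) 0 + 1))
        (PySem.Dict.empty : PySem.Dict String Int)
        = PySem.Dict.counter ((getEntries data).map (fun e => eventType e)) := by
    rw [← PySem.Dict.foldl_insert_getD_add_one_eq_counter, List.foldl_map]
  simp only [hfold, counter_sorted_eq_runs]
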